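-- pv_equiv track=rewrite | github.com/UCLA-VAST/RapidStream | utilities/merge_multiple_tracking_log.py | count_active_jobs
-- ===== SOURCE A (Python) =====
-- from typing import List, Dict, Tuple, Any
--
-- def count_active_jobs(sample_timestamps: List[int], job_start_end_time_list: List[Tuple[int, int]]) -> List[int]:
--   active_job_tracking = []
--   for sample_time in sample_timestamps:
--     cnt = 0
--     for start, end in job_start_end_time_list:
--       if int(start) <= sample_time <= int(end):
--         cnt += 1
--     active_job_tracking.append(cnt)
--
--   return active_job_tracking
-- ===== SOURCE B (Python) =====
-- from typing import List, Tuple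
--
--
-- def _bisect_right(a: List[int], x: int) -> int:
--     lo, hi = 0, len(a)
--     while lo < hi:
--         mid = (lo + hi) // 2
--         if x < a[mid]:
--             hi = mid
--         else:
--             lo = mid + 1
--     return lo
--
--
-- def _bisect_left(a: List[int], x: int) -> int:
--     lo, hi = 0, len(a)
--     while lo < hi:
--         mid = (lo + hi) // 2
--         if a[mid] < x:
--             lo = mid + 1
--         else:
--             hi = mid
--     return lo
--
--
-- def count_active_jobs(sample_timestamps: List[int], job_start_end_time_list: List[Tuple[int, int]]) -> List[int]:
--     # Empty intervals (start > end) cover no timestamp, so drop them once.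
--     valid = [(s, e) for s, e in job_start_end_time_list if s <= e]
--     starts = sorted(s for s, _ in valid)
--     ends = sorted(e for _, e in valid)
--     # active at t  =  #starts <= t  -  #ends < t
--     return [_bisect_right(starts, t) - _bisect_left(ends, t) for t in sample_timestamps]
-- ===== Notes on version B (the rewrite author's own statement) =====
-- stated objective: faster
-- what changed: Instead of scanning every job for every timestamp, B sorts the start times and end times once and answers each timestamp with two binary searches (count = #starts<=t minus #ends<t, after dropping empty intervals with start>end).
import Mathlib
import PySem

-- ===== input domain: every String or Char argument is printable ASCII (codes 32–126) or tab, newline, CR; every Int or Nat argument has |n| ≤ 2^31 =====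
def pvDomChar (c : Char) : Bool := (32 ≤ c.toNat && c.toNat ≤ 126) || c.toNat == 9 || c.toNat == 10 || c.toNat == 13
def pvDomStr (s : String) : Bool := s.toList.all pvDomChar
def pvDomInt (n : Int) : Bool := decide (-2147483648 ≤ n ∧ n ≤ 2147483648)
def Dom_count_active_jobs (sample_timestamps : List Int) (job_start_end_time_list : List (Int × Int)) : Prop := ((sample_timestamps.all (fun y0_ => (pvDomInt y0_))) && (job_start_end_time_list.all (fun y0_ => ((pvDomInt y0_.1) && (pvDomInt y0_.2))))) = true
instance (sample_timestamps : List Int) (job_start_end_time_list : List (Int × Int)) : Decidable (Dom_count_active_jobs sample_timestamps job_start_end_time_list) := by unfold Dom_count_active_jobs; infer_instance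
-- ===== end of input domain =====

-- B replaces A's per-timestamp scan of all jobs by sorting start and end times once
-- and answering each timestamp with two binary searches (objective: faster, O((S+J) log J)).

-- ===== PORT A =====
def count_active_jobs (sample_timestamps : List Int) (job_start_end_time_list : List (Int × Int)) : List Int :=
  sample_timestamps.foldl (fun active_job_tracking sample_time =>
    active_job_tracking ++
      [job_start_end_time_list.foldl (fun cnt p =>
        if p.1 ≤ sample_time ∧ sample_time ≤ p.2 then cnt + 1 else cnt) (0 : Int)]) []

-- ===== PORT B =====
def count_active_jobs_alt (sample_timestamps : List Int) (job_start_end_time_list : List (Int × Int)) : List Int :=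
  let valid := job_start_end_time_list.filter (fun p => decide (p.1 ≤ p.2))
  let starts := PySem.List.sorted (valid.map Prod.fst) (fun x => x)
  let ends := PySem.List.sorted (valid.map Prod.snd) (fun x => x)
  sample_timestamps.map (fun t =>
    (PySem.List.bisectRight starts t : Int) - (PySem.List.bisectLeft ends t : Int))

-- ===== PRECONDITION & SPEC =====
def Spec_count_active_jobs (sample_timestamps : List Int) (job_start_end_time_list : List (Int × Int)) (out : List Int) : Prop := out = count_active_jobs_alt sample_timestamps job_start_end_time_list
instance (sample_timestamps : List Int) (job_start_end_time_list : List (Int × Int)) (out : List Int) : Decidable (Spec_count_active_jobs sample_timestamps job_start_end_time_list out) := by unfold Spec_count_active_jobs; infer_instance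

-- ===== CLAIM (what is proved, stated in full; the proofs are below) =====
def Claim_equal_count_active_jobs : Prop := ∀ (sample_timestamps : List Int) (job_start_end_time_list : List (Int × Int)), Dom_count_active_jobs sample_timestamps job_start_end_time_list → Spec_count_active_jobs sample_timestamps job_start_end_time_list (count_active_jobs sample_timestamps job_start_end_time_list)

-- ===== LEMMAS AND PROOFS =====

-- a countP is pinned down by a split point: everything before r satisfies p, nothing from r on does
theorem pv_countP_eq_split (xs : List Int) (p : Int → Bool) (r : Nat) (hr : r ≤ xs.length)
    (h1 : ∀ j (hj : j < xs.length), j < r → p xs[j])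
    (h2 : ∀ j (hj : j < xs.length), r ≤ j → ¬ p xs[j]) :
    xs.countP p = r := by
  induction xs generalizing r with
  | nil => simpa using (Nat.le_zero.mp (by simpa using hr)).symm
  | cons x xs ih =>
    cases r with
    | zero =>
      simp only [List.countP_cons]
      have hx : ¬ p x := h2 0 (by simp) (Nat.zero_le _)
      have : xs.countP p = 0 := by
        apply List.countP_eq_zero.mpr
        intro a ha
        obtain ⟨j, hj, rfl⟩ := List.mem_iff_getElem.mp ha
        exact h2 (j+1) (by simpa using Nat.succ_lt_succ hj) (Nat.zero_le _)
      simp [this, hx]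
    | succ r' =>
      have hx : p x := h1 0 (by simp) (Nat.succ_pos _)
      have htl : xs.countP p = r' := by
        apply ih r' (by simpa using Nat.succ_le_succ_iff.mp hr)
        · intro j hj hjr
          exact h1 (j+1) (by simpa using Nat.succ_lt_succ hj) (Nat.succ_lt_succ hjr)
        · intro j hj hjr
          exact h2 (j+1) (by simpa using Nat.succ_lt_succ hj) (Nat.succ_le_succ hjr)
      simp [List.countP_cons, hx, htl]

theorem pv_bisectRight_count (xs : List Int) (t : Int)
    (hs : List.Pairwise (fun a b => a ≤ b) xs) :
    PySem.List.bisectRight xs t = xs.countP (fun y => decide (y ≤ t)) := by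
  obtain ⟨hle, h1, h2⟩ := PySem.List.bisectRight_spec xs t hs
  exact (pv_countP_eq_split xs _ _ hle
    (fun j hj hjr => by simpa using h1 j hj hjr)
    (fun j hj hjr => by simpa using not_le.mpr (h2 j hj hjr))).symm

theorem pv_bisectLeft_count (xs : List Int) (t : Int)
    (hs : List.Pairwise (fun a b => a ≤ b) xs) :
    PySem.List.bisectLeft xs t = xs.countP (fun y => decide (y < t)) := by
  obtain ⟨hle, h1, h2⟩ := PySem.List.bisectLeft_spec xs t hs
  exact (pv_countP_eq_split xs _ _ hle
    (fun j hj hjr => by simpa using h1 j hj hjr)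
    (fun j hj hjr => by simpa using not_lt.mpr (h2 j hj hjr))).symm

-- A's inner loop is a countP
theorem pv_foldl_count (t : Int) (l : List (Int × Int)) (c : Int) :
    l.foldl (fun cnt p => if p.1 ≤ t ∧ t ≤ p.2 then cnt + 1 else cnt) c
      = c + l.countP (fun p => decide (p.1 ≤ t ∧ t ≤ p.2)) := by
  induction l generalizing c with
  | nil => simp
  | cons p l ih =>
    simp only [List.foldl_cons, List.countP_cons, ih]
    by_cases h : p.1 ≤ t ∧ t ≤ p.2 <;> simp [h] <;> push_cast <;> ring

-- A's outer loop builds a map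
theorem pv_foldl_append_map {α β : Type} (f : α → β) (l : List α) (init : List β) :
    l.foldl (fun acc x => acc ++ [f x]) init = init ++ l.map f := by
  induction l generalizing init with
  | nil => simp
  | cons x l ih => simp [ih]

-- the counting identity: active jobs at t = #starts ≤ t − #ends < t over the valid jobs
theorem pv_count_identity (t : Int) (jobs : List (Int × Int)) :
    ((jobs.countP (fun p => decide (p.1 ≤ t ∧ t ≤ p.2)) : Int))
      = ((jobs.filter (fun p => decide (p.1 ≤ p.2))).countP (fun p => decide (p.1 ≤ t)) : Int)
        - ((jobs.filter (fun p => decide (p.1 ≤ p.2))).countP (fun p => decide (p.2 < t)) : Int) := by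
  induction jobs with
  | nil => simp
  | cons p l ih =>
    by_cases hv : p.1 ≤ p.2
    · have hf : (p :: l).filter (fun p => decide (p.1 ≤ p.2))
          = p :: l.filter (fun p => decide (p.1 ≤ p.2)) := by
        simp [List.filter_cons, hv]
      rw [hf, List.countP_cons, List.countP_cons, List.countP_cons]
      split_ifs <;> simp only [decide_eq_true_eq] at * <;> push_cast <;> omega
    · have hf : (p :: l).filter (fun p => decide (p.1 ≤ p.2))
          = l.filter (fun p => decide (p.1 ≤ p.2)) := by
        simp [List.filter_cons, hv]
      rw [hf, List.countP_cons]
      have hA : decide (p.1 ≤ t ∧ t ≤ p.2) = false := by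
        simp only [decide_eq_false_iff_not]
        exact fun ⟨a, b⟩ => hv (a.trans b)
      rw [hA]
      simpa using ih

-- ===== VERDICT (by name: the statement is the Claim_ definition above) =====
theorem count_active_jobs_spec : Claim_equal_count_active_jobs := by
  intro ts jobs _
  unfold Spec_count_active_jobs count_active_jobs count_active_jobs_alt
  rw [pv_foldl_append_map]
  simp only [List.nil_append]
  apply List.map_congr_left
  intro t _
  rw [pv_foldl_count]
  rw [pv_bisectRight_count _ t (by
    simpa using PySem.List.sorted_pairwise ((jobs.filter (fun p => decide (p.1 ≤ p.2))).map Prod.fst) (fun x => x))]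
  rw [pv_bisectLeft_count _ t (by
    simpa using PySem.List.sorted_pairwise ((jobs.filter (fun p => decide (p.1 ≤ p.2))).map Prod.snd) (fun x => x))]
  rw [List.Perm.countP_eq _ (PySem.List.sorted_perm _ _ _),
      List.Perm.countP_eq _ (PySem.List.sorted_perm _ _ _)]
  rw [List.countP_map, List.countP_map]
  rw [zero_add]
  exact pv_count_identity t jobs
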